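-- pv_equiv track=rewrite | github.com/jrc-rodec/scheduling_model | code/demo/mas.py | get_dominance
-- ===== SOURCE A (Python) =====
-- def get_dominance(solutions, index):
--     # NOTE: assumes all objective functions try to minimize (not true for e.g. profit, but not really used currently so doesn't matter yet)
--     solution = solutions[index]
--     dominance = [True for _ in range(len(solution[1]))]
--     for i in range(len(solutions)):
--         if i != index:
--             for j in range(len(solution[1])):
--                 if solutions[i][1][j] < solution[1][j]:
--                     dominance[j] = False
--     count = 0
--     for i in range(len(dominance)):
--         if dominance[i]:
--             count += 1
--     return count
-- ===== SOURCE B (Python) =====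
-- def get_dominance(solutions, index):
--     # Two passes: build the per-objective column minima over ALL solutions,
--     # then count the objectives where this solution attains the column minimum.
--     target = solutions[index][1]
--     col_min = [min(s[1][j] for s in solutions) for j in range(len(target))]
--     return sum(1 for j in range(len(target)) if target[j] == col_min[j])
-- ===== Notes on version B (the rewrite author's own statement) =====
-- stated objective: simpler
-- what changed: Replaced A's mutable per-objective flag list flipped row by row with two clean passes: precompute each objective's column minimum over all solutions, then count the objectives where the indexed solution attains that minimum.
import Mathlib
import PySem

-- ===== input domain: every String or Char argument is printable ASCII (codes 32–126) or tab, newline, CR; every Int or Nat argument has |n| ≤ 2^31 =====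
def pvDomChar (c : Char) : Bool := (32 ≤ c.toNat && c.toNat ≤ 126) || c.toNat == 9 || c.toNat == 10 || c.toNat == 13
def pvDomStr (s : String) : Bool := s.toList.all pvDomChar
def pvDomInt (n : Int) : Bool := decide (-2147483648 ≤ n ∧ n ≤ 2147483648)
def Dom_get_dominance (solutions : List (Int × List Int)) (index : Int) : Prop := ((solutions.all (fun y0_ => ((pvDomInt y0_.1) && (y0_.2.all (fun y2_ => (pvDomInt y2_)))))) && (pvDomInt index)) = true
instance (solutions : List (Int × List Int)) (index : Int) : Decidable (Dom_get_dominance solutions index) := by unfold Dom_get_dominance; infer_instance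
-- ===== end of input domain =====

-- B replaces A's row-by-row flag-flipping with two passes: precompute the per-objective
-- column minima over all solutions, then count objectives where the chosen solution
-- attains the column minimum (objective: simpler decomposition, same asymptotic cost).


-- ===== PORT A =====
-- literal transliteration of A: flag list initialised to True, flipped to False whenever
-- some other row is strictly smaller in that objective, then the flags are counted.
def get_dominance (solutions : List (Int × List Int)) (index : Int) : Int :=
  let solution := PySem.List.pyGetD solutions index (0, [])
  let dominance0 := (List.range solution.2.length).map (fun _ => true)
  let dominance := (List.range solutions.length).foldl (fun (dom : List Bool) (i : Nat) =>
    if (i : Int) ≠ index then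
      (List.range solution.2.length).foldl (fun (dom : List Bool) (j : Nat) =>
        if PySem.List.pyGetD (PySem.List.pyGetD solutions (i : Int) (0, [])).2 (j : Int) 0 <
           PySem.List.pyGetD solution.2 (j : Int) 0 then
          PySem.List.pySetD dom (j : Int) false
        else dom) dom
    else dom) dominance0
  (List.range dominance.length).foldl (fun (count : Int) (i : Nat) =>
    if PySem.List.pyGetD dominance (i : Int) false then count + 1 else count) 0

-- ===== PORT B =====
-- literal transliteration of B: build col_min, then count matches against it.
def get_dominance_alt (solutions : List (Int × List Int)) (index : Int) : Int :=
  let target := (PySem.List.pyGetD solutions index (0, [])).2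
  let colMin := (List.range target.length).map (fun (j : Nat) =>
    (PySem.List.min? (solutions.map (fun s => PySem.List.pyGetD s.2 (j : Int) 0)) (fun x => x)).getD 0)
  (List.range target.length).foldl (fun (c : Int) (j : Nat) =>
    if PySem.List.pyGetD target (j : Int) 0 = PySem.List.pyGetD colMin (j : Int) 0 then c + 1 else c) 0

-- ===== PRECONDITION & SPEC =====
-- Pre_ excludes exactly the inputs where A raises IndexError: an index outside
-- -len..len-1, or some row whose objective list is shorter than the chosen row's.
def Pre_get_dominance (solutions : List (Int × List Int)) (index : Int) : Prop :=
  PySem.Raise.InRange solutions.length index ∧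
  ∀ s ∈ solutions, (PySem.List.pyGetD solutions index (0, [])).2.length ≤ s.2.length
instance (solutions : List (Int × List Int)) (index : Int) : Decidable (Pre_get_dominance solutions index) := by
  unfold Pre_get_dominance PySem.Raise.InRange; infer_instance
def pvWitness_get_dominance : (List (Int × List Int)) × Int := ([(0, [1, 2]), (1, [2, 1])], 0)

def Spec_get_dominance (solutions : List (Int × List Int)) (index : Int) (out : Int) : Prop := out = get_dominance_alt solutions index
instance (solutions : List (Int × List Int)) (index : Int) (out : Int) : Decidable (Spec_get_dominance solutions index out) := by unfold Spec_get_dominance; infer_instance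

-- ===== CLAIM (what is proved, stated in full; the proofs are below) =====
def Claim_equal_get_dominance : Prop := ∀ (solutions : List (Int × List Int)) (index : Int), Dom_get_dominance solutions index → Pre_get_dominance solutions index → Spec_get_dominance solutions index (get_dominance solutions index)

-- ===== LEMMAS AND PROOFS =====

-- setting an element of a map-over-range is again a map-over-range
theorem map_range_set (n j : Nat) (f : Nat → Bool) (v : Bool) (_hj : j < n) :
    ((List.range n).map f).set j v = (List.range n).map (fun k => if k = j then v else f k) := by
  apply List.ext_getElem
  · simp
  · intro k h1 h2
    simp only [List.length_set, List.length_map, List.length_range] at h1 h2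
    by_cases hk : k = j
    · simp [hk]
    · simp [List.getElem_set, eq_comm]

-- inner loop of A: flipping flags over all j in range n is a pointwise map
theorem inner_loop_char (c : Nat → Prop) [DecidablePred c] (js : List Nat) (n : Nat) (f : Nat → Bool)
    (hjs : ∀ j ∈ js, j < n) :
    js.foldl (fun d j => if c j then d.set j false else d) ((List.range n).map f)
      = (List.range n).map (fun k => f k && !(js.contains k && decide (c k))) := by
  induction js generalizing f with
  | nil => simp
  | cons j rest ih =>
    have hj : j < n := hjs j (by simp)
    have hrest : ∀ x ∈ rest, x < n := fun x hx => hjs x (by simp [hx])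
    simp only [List.foldl_cons]
    by_cases hc : c j
    · rw [if_pos hc, map_range_set n j f false hj,
        ih (fun k => if k = j then false else f k) hrest]
      apply List.map_congr_left
      intro k _
      by_cases hk : k = j <;> simp [hk, hc]
    · rw [if_neg hc, ih f hrest]
      apply List.map_congr_left
      intro k _
      by_cases hk : k = j <;> simp [hk, hc]

-- outer loop of A: the final flag list is a pointwise map over the objectives
theorem outer_loop_char (index : Int) (C : Nat → Nat → Prop) [∀ i j, Decidable (C i j)]
    (is : List Nat) (n : Nat) (f : Nat → Bool) :
    is.foldl (fun (dom : List Bool) (i : Nat) =>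
        if (i : Int) ≠ index then
          (List.range n).foldl (fun d j => if C i j then d.set j false else d) dom
        else dom) ((List.range n).map f)
      = (List.range n).map (fun k =>
          f k && !(is.any (fun i => decide ((i : Int) ≠ index) && decide (C i k)))) := by
  induction is generalizing f with
  | nil => simp
  | cons i rest ih =>
    simp only [List.foldl_cons]
    by_cases hi : (i : Int) ≠ index
    · rw [if_pos hi, inner_loop_char (C i) (List.range n) n f (by simp),
        ih (fun k => f k && !((List.range n).contains k && decide (C i k)))]
      apply List.map_congr_left
      intro k hk
      simp only [List.mem_range] at hk
      simp [hk, hi, Bool.and_assoc]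
    · rw [if_neg hi, ih f]
      apply List.map_congr_left
      intro k _
      have heq : (i : Int) = index := not_not.mp hi
      simp [List.any_cons, heq]

-- the pointwise fact: flag k is true iff the target value is the column minimum
theorem flag_iff_min (solutions : List (Int × List Int)) (index : Int)
    (hin : PySem.Raise.InRange solutions.length index)
    (sol : Int × List Int) (hsol : sol = PySem.List.pyGetD solutions index (0, [])) (k : Nat) :
    (!((List.range solutions.length).any (fun i => decide ((i : Int) ≠ index) &&
        decide (PySem.List.pyGetD (PySem.List.pyGetD solutions (i : Int) (0, [])).2 (k : Int) 0 <
          PySem.List.pyGetD sol.2 (k : Int) 0))))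
      = decide (PySem.List.pyGetD sol.2 (k : Int) 0 =
          (PySem.List.min? (solutions.map (fun s => PySem.List.pyGetD s.2 (k : Int) 0)) (fun x => x)).getD 0) := by
  set v := PySem.List.pyGetD sol.2 (k : Int) 0 with hv
  set L := solutions.map (fun s => PySem.List.pyGetD s.2 (k : Int) 0) with hL
  have hsolmem : sol ∈ solutions := hsol ▸ PySem.List.pyGetD_mem solutions (0, []) hin
  have hvL : v ∈ L := by
    rw [hL]; exact List.mem_map.mpr ⟨sol, hsolmem, rfl⟩
  obtain ⟨m, hm⟩ : ∃ m, PySem.List.min? L (fun x => x) = some m := by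
    cases hmo : PySem.List.min? L (fun x => x) with
    | none =>
      rw [PySem.List.min?_eq_none_iff] at hmo
      rw [hmo] at hvL; simp at hvL
    | some m => exact ⟨m, rfl⟩
  have hmmem : m ∈ L := PySem.List.min?_mem hm
  have hmle : ∀ y ∈ L, m ≤ y := PySem.List.min?_isMin hm
  rw [hm]
  simp only [Option.getD_some]
  -- the any-loop detects exactly 'some column entry is strictly below v'
  have key : ((List.range solutions.length).any (fun i => decide ((i : Int) ≠ index) &&
      decide (PySem.List.pyGetD (PySem.List.pyGetD solutions (i : Int) (0, [])).2 (k : Int) 0 < v)) = true)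
      ↔ ∃ x ∈ L, x < v := by
    constructor
    · intro h
      obtain ⟨i, hi, hcond⟩ := List.any_eq_true.mp h
      simp only [List.mem_range] at hi
      simp only [Bool.and_eq_true, decide_eq_true_eq] at hcond
      refine ⟨PySem.List.pyGetD (PySem.List.pyGetD solutions (i : Int) (0, [])).2 (k : Int) 0, ?_, hcond.2⟩
      rw [hL]
      refine List.mem_map.mpr ⟨PySem.List.pyGetD solutions (i : Int) (0, []), ?_, rfl⟩
      exact PySem.List.pyGetD_mem solutions (0, []) ⟨by omega, by omega⟩
    · rintro ⟨x, hx, hxv⟩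
      rw [hL] at hx
      obtain ⟨s, hs, rfl⟩ := List.mem_map.mp hx
      obtain ⟨i, hi, hsi⟩ := List.mem_iff_getElem.mp hs
      apply List.any_eq_true.mpr
      refine ⟨i, List.mem_range.mpr hi, ?_⟩
      have hgi : PySem.List.pyGetD solutions (i : Int) (0, []) = s := by
        rw [PySem.List.pyGetD_natCast, List.getD_eq_getElem _ _ hi, hsi]
      have hne : (i : Int) ≠ index := by
        intro heq
        have hss : sol = s := by rw [hsol, ← heq, hgi]
        rw [← hss] at hxv
        rw [← hv] at hxv
        exact lt_irrefl v hxv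
      rw [hgi]
      simp only [Bool.and_eq_true, decide_eq_true_eq]
      exact ⟨hne, hxv⟩
  by_cases hex : ∃ x ∈ L, x < v
  · rw [key.mpr hex]
    have h1 : ¬ (v = m) := by
      intro hvm
      obtain ⟨x, hx, hxv⟩ := hex
      have := hmle x hx
      omega
    simp [h1]
  · have h2 : ((List.range solutions.length).any (fun i => decide ((i : Int) ≠ index) &&
        decide (PySem.List.pyGetD (PySem.List.pyGetD solutions (i : Int) (0, [])).2 (k : Int) 0 < v))) = false := by
      rw [← Bool.not_eq_true, key]; exact hex
    have h1 : v = m := by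
      have h3 : m ≤ v := hmle v hvL
      by_contra hne
      exact hex ⟨m, hmmem, by omega⟩
    rw [h2]
    simp [h1]

-- ===== VERDICT (by name: the statement is the Claim_ definition above) =====
theorem get_dominance_spec : Claim_equal_get_dominance := by
  intro solutions index _ hpre
  obtain ⟨hin, _⟩ := hpre
  unfold Spec_get_dominance get_dominance get_dominance_alt
  simp only []
  set sol := PySem.List.pyGetD solutions index (0, []) with hsol
  set n := sol.2.length with hn
  -- rewrite A's loops with the characterisations
  rw [show (fun (dom : List Bool) (i : Nat) =>
        if (i : Int) ≠ index then
          (List.range n).foldl (fun (d : List Bool) (j : Nat) =>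
            if PySem.List.pyGetD (PySem.List.pyGetD solutions (i : Int) (0, [])).2 (j : Int) 0 <
               PySem.List.pyGetD sol.2 (j : Int) 0 then
              PySem.List.pySetD d (j : Int) false
            else d) dom
        else dom)
      = (fun (dom : List Bool) (i : Nat) =>
        if (i : Int) ≠ index then
          (List.range n).foldl (fun (d : List Bool) (j : Nat) =>
            if PySem.List.pyGetD (PySem.List.pyGetD solutions (i : Int) (0, [])).2 (j : Int) 0 <
               PySem.List.pyGetD sol.2 (j : Int) 0 then
              d.set j false
            else d) dom
        else dom) from by
      funext dom i
      by_cases hi : (i : Int) ≠ index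
      · simp only [if_pos hi]
        apply PySem.List.foldl_congr_mem
        intro d j _
        rw [PySem.List.pySetD_natCast]
      · simp [hi]]
  rw [outer_loop_char index
    (fun i j => PySem.List.pyGetD (PySem.List.pyGetD solutions (i : Int) (0, [])).2 (j : Int) 0 <
      PySem.List.pyGetD sol.2 (j : Int) 0) (List.range solutions.length) n (fun _ => true)]
  simp only [List.length_map, List.length_range, Bool.true_and]
  apply PySem.List.foldl_congr_mem
  intro acc j hj
  simp only [List.mem_range] at hj
  rw [PySem.List.pyGetD_natCast, PySem.List.getD_map_range _ _ _ _ hj,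
    PySem.List.pyGetD_natCast ((List.range n).map _), PySem.List.getD_map_range _ _ _ _ hj]
  rw [flag_iff_min solutions index hin sol hsol j]
  by_cases hc : PySem.List.pyGetD sol.2 (j : Int) 0 =
      (PySem.List.min? (solutions.map (fun s => PySem.List.pyGetD s.2 (j : Int) 0)) (fun x => x)).getD 0 <;>
    simp [hc]
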